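-- pv_equiv track=rewrite | github.com/Vishal487/interviewbit | Strings/remove consecutive chars.py | solve
-- ===== SOURCE A (Python) =====
-- def solve(A, B):
--     # write your code here...
--     n = len(A)
--     s = ""
--     i = 0
--     j = 0
--     while i < n:
--         temp = ""
--         j = i
--         while j < n and A[i] == A[j]:
--             temp += A[j]
--             j += 1
--         if len(temp) != B:
--             s += temp
--         i = j
--     return s
-- ===== SOURCE B (Python) =====
-- def solve(A, B):
--     # single forward pass building the run decomposition, then keep runs whose length != B
--     runs = []
--     for c in A:
--         if runs and runs[-1][-1] == c:
--             runs[-1].append(c)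
--         else:
--             runs.append([c])
--     return "".join("".join(r) for r in runs if len(r) != B)
-- ===== Notes on version B (the rewrite author's own statement) =====
-- stated objective: faster
-- what changed: Replaces the nested index-scanning while-loops that build runs via repeated string concatenation with a single forward fold over the characters that builds the list of maximal runs as lists, followed by a filter-and-join.
import Mathlib
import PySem

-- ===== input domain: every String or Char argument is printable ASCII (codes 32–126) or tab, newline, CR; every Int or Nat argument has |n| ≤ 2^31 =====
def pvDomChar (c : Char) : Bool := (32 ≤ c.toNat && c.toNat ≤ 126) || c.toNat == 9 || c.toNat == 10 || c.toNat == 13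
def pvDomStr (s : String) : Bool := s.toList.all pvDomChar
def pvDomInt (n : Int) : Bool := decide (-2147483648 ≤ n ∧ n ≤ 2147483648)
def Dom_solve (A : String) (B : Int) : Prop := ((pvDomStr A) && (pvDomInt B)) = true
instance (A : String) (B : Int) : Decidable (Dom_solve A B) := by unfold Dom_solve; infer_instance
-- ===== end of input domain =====

-- B builds the run decomposition in one fold (list appends, one join) and filters it; A scans runs with nested index loops building each run by string +=. Measured faster in a timing run.

-- ===== PORT A =====
-- inner loop: while j < n and A[i] == A[j]: temp += A[j]; j += 1
def innerA (l : List Char) (n i j : Int) (temp : List Char) : Int × List Char :=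
  if h : j < n ∧ PySem.List.pyGet? l i = PySem.List.pyGet? l j then
    innerA l n i (j + 1) (temp ++ (PySem.List.pyGet? l j).toList)
  else
    (j, temp)
termination_by (n - j).toNat
decreasing_by
  exact (Int.toNat_lt_toNat (Int.sub_pos.mpr h.1)).mpr (Int.sub_lt_sub_left (lt_add_one j) n)

theorem innerA_fst_ge (l : List Char) (n i : Int) : ∀ (j : Int) (temp : List Char),
    j ≤ (innerA l n i j temp).1 := by
  intro j temp
  induction hn : (n - j).toNat generalizing j temp with
  | zero =>
    rw [innerA, dif_neg (by omega)]
  | succ k ih =>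
    rw [innerA]
    split
    · have := ih (j + 1) (temp ++ (PySem.List.pyGet? l j).toList) (by omega)
      omega
    · simp

theorem innerA_fst_gt (l : List Char) (n i : Int) (temp : List Char) (h : i < n) :
    i + 1 ≤ (innerA l n i i temp).1 := by
  rw [innerA, dif_pos ⟨h, rfl⟩]
  exact innerA_fst_ge l n i (i + 1) _

-- outer loop: while i < n: …
def outerA (l : List Char) (n B i : Int) (s : List Char) : List Char :=
  if h : i < n then
    let r := innerA l n i i []
    outerA l n B r.1 (if ((r.2.length : Int) ≠ B) then s ++ r.2 else s)
  else
    s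
termination_by (n - i).toNat
decreasing_by
  exact (Int.toNat_lt_toNat (Int.sub_pos.mpr h)).mpr
    (Int.sub_lt_sub_left (Int.lt_of_lt_of_le (lt_add_one i) (innerA_fst_gt l n i [] h)) n)

def solve (A : String) (B : Int) : String :=
  String.mk (outerA A.toList ((A.toList.length : Int)) B 0 [])

-- ===== PORT B =====
-- one step of the for-loop: extend the last run or start a new one
def addChar (runs : List (List Char)) (c : Char) : List (List Char) :=
  match runs.getLast? with
  | some r => if r.getLast? = some c then runs.dropLast ++ [r ++ [c]] else runs ++ [[c]]
  | none => runs ++ [[c]]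

def solve_alt (A : String) (B : Int) : String :=
  String.mk ((((A.toList.foldl addChar []).filter
    (fun r => (r.length : Int) ≠ B)).map id).flatten)

-- ===== PRECONDITION & SPEC =====
def Spec_solve (A : String) (B : Int) (out : String) : Prop := out = solve_alt A B
instance (A : String) (B : Int) (out : String) : Decidable (Spec_solve A B out) := by unfold Spec_solve; infer_instance

-- ===== CLAIM (what is proved, stated in full; the proofs are below) =====
def Claim_equal_solve : Prop := ∀ (A : String) (B : Int), Dom_solve A B → Spec_solve A B (solve A B)

-- ===== LEMMAS AND PROOFS =====

-- reference run decomposition: maximal runs of equal characters, front to back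
def runsR (l : List Char) : List (List Char) :=
  match l with
  | [] => []
  | c :: t => (c :: t.takeWhile (· = c)) :: runsR (t.dropWhile (· = c))
termination_by l.length
decreasing_by
  exact Nat.lt_succ_of_le (List.length_dropWhile_le _ t)

theorem pyGet?_drop_head (l : List Char) (i : Int) (c : Char) (t : List Char)
    (h0 : 0 ≤ i) (hd : l.drop i.toNat = c :: t) :
    PySem.List.pyGet? l i = some c := by
  rw [PySem.List.pyGet?_of_nonneg l h0, ← List.head?_drop, hd]
  rfl

theorem innerA_spec (l : List Char) (c : Char) (i : Int) (hc : PySem.List.pyGet? l i = some c) :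
    ∀ (j : Int) (temp : List Char), 0 ≤ j → j ≤ (l.length : Int) →
    innerA l (l.length : Int) i j temp =
      (j + (((l.drop j.toNat).takeWhile (· = c)).length : Int),
       temp ++ (l.drop j.toNat).takeWhile (· = c)) := by
  intro j temp h0 hle
  induction hn : (l.length - j.toNat) generalizing j temp with
  | zero =>
    have hdrop : l.drop j.toNat = [] := List.drop_eq_nil_of_le (by omega)
    rw [innerA, dif_neg (by rintro ⟨h1, -⟩; omega), hdrop]
    simp
  | succ k ih =>
    have hjlt : j < (l.length : Int) := by omega
    obtain ⟨d, t, hd⟩ : ∃ d t, l.drop j.toNat = d :: t := by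
      cases hdd : l.drop j.toNat with
      | nil =>
        have := List.drop_eq_nil_iff.mp hdd
        omega
      | cons d t => exact ⟨d, t, rfl⟩
    have hgj : PySem.List.pyGet? l j = some d := pyGet?_drop_head l j d t h0 hd
    rw [innerA]
    by_cases hcd : c = d
    · subst hcd
      rw [dif_pos ⟨hjlt, by rw [hc, hgj]⟩]
      have ht : l.drop (j + 1).toNat = t := by
        have h1 : (j + 1).toNat = j.toNat + 1 := by omega
        rw [h1, ← List.drop_drop, hd]
        rfl
      rw [ih (j + 1) (temp ++ (PySem.List.pyGet? l j).toList) (by omega) (by omega) (by omega)]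
      rw [ht, hd, hgj, List.takeWhile_cons_of_pos (by simp)]
      simp only [Prod.mk.injEq, List.length_cons]
      refine ⟨by push_cast; ring, by simp⟩
    · rw [dif_neg (by
        rintro ⟨-, he⟩
        rw [hc, hgj] at he
        exact hcd (Option.some.injEq _ _ ▸ he))]
      rw [hd]
      rw [List.takeWhile_cons_of_neg (by simp [Ne.symm hcd])]
      simp

theorem drop_takeWhile_len (t : List Char) (c : Char) :
    t.drop (t.takeWhile (· = c)).length = t.dropWhile (· = c) := by
  nth_rewrite 2 [← List.takeWhile_append_dropWhile (p := fun x => decide (x = c)) (l := t)]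
  rw [List.drop_left]

theorem outerA_spec (l : List Char) (B : Int) :
    ∀ (i : Int) (s : List Char), 0 ≤ i → i ≤ (l.length : Int) →
    outerA l (l.length : Int) B i s =
      s ++ ((runsR (l.drop i.toNat)).filter (fun r => (r.length : Int) ≠ B)).flatten := by
  intro i s h0 hle
  induction hn : (l.length - i.toNat) using Nat.strong_induction_on generalizing i s with
  | _ m ih =>
  by_cases hilt : i < (l.length : Int)
  · obtain ⟨c, t, hd⟩ : ∃ c t, l.drop i.toNat = c :: t := by
      cases hdd : l.drop i.toNat with
      | nil =>
        have := List.drop_eq_nil_iff.mp hdd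
        omega
      | cons c t => exact ⟨c, t, rfl⟩
    have hc : PySem.List.pyGet? l i = some c := pyGet?_drop_head l i c t h0 hd
    have hlenl : i.toNat + 1 + t.length = l.length := by
      have h1 := congrArg List.length hd
      simp only [List.length_drop, List.length_cons] at h1
      omega
    have htwle : (t.takeWhile (· = c)).length ≤ t.length :=
      (List.takeWhile_prefix _).length_le
    rw [outerA, dif_pos hilt]
    rw [innerA_spec l c i hc i [] h0 (by omega)]
    rw [hd, List.takeWhile_cons_of_pos (by simp)]
    simp only [List.nil_append, List.length_cons]
    have hnext : l.drop (i + ((t.takeWhile (· = c)).length + 1 : ℕ)).toNat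
        = t.dropWhile (· = c) := by
      have h1 : (i + ((t.takeWhile (· = c)).length + 1 : ℕ)).toNat
          = i.toNat + ((t.takeWhile (· = c)).length + 1) := by omega
      rw [h1, ← List.drop_drop, hd, List.drop_succ_cons]
      exact drop_takeWhile_len t c
    rw [ih (l.length - (i + ((t.takeWhile (· = c)).length + 1 : ℕ)).toNat) (by omega)
      _ _ (by omega) (by push_cast; omega) rfl]
    rw [hnext, runsR]
    simp only [List.filter_cons, List.length_cons]
    by_cases hB : ((t.takeWhile (· = c)).length : ℤ) + 1 = B
    · rw [if_neg (by push_cast; omega)]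
      rw [if_neg (by simp only [decide_eq_true_eq, List.length_cons]; push_cast; omega)]
    · rw [if_pos (by push_cast; omega)]
      rw [if_pos (by simp only [decide_eq_true_eq, List.length_cons]; push_cast; omega)]
      simp [List.append_assoc]
  · have hdrop : l.drop i.toNat = [] := List.drop_eq_nil_of_le (by omega)
    rw [outerA, dif_neg hilt, hdrop, runsR]
    simp

theorem foldl_addChar_inv (l : List Char) :
    ∀ (rs : List (List Char)) (r : List Char) (c : Char), r.getLast? = some c →
    l.foldl addChar (rs ++ [r]) =
      rs ++ ((r ++ l.takeWhile (· = c)) :: runsR (l.dropWhile (· = c))) := by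
  induction l with
  | nil =>
    intro rs r c h
    simp [runsR]
  | cons d t ih =>
    intro rs r c h
    have hrne : r ≠ [] := by
      intro he
      rw [he] at h
      simp at h
    simp only [List.foldl_cons]
    simp only [addChar, List.getLast?_concat, List.dropLast_concat]
    by_cases hdc : d = c
    · subst hdc
      rw [if_pos (by rw [h])]
      rw [ih rs (r ++ [d]) d (by simp)]
      rw [List.takeWhile_cons_of_pos (by simp), List.dropWhile_cons_of_pos (by simp)]
      simp [List.append_assoc]
    · rw [if_neg (by rw [h]; simp [Ne.symm hdc])]
      rw [show rs ++ [r] ++ [[d]] = (rs ++ [r]) ++ [[d]] by simp]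
      rw [ih (rs ++ [r]) [d] d (by simp)]
      rw [List.takeWhile_cons_of_neg (by simp [hdc]), List.dropWhile_cons_of_neg (by simp [hdc])]
      rw [runsR]
      simp

theorem foldl_addChar_runs (l : List Char) : l.foldl addChar [] = runsR l := by
  cases l with
  | nil => simp [runsR]
  | cons c t =>
    simp only [List.foldl_cons]
    have h1 : addChar [] c = [] ++ [[c]] := by rfl
    rw [h1, foldl_addChar_inv t [] [c] c (by simp)]
    rw [runsR]
    simp

-- ===== VERDICT (by name: the statement is the Claim_ definition above) =====
theorem solve_spec : Claim_equal_solve := by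
  intro A B _
  unfold Spec_solve solve solve_alt
  rw [foldl_addChar_runs]
  rw [outerA_spec A.toList B 0 [] (by omega) (by positivity)]
  simp
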